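-- pv_equiv track=rewrite | github.com/Lappalainen-Joel/useful_scripts | unigrep.py | createFileList
-- ===== SOURCE A (Python) =====
-- def createFileList(argslist):
--     start = 0
--     fileList = []
--     for i in argslist:
--         if i == '-f':
--             start = 1
--         elif start == 1:
--             fileList.append(i)
--     if start == 0:
--         fileList.append(argslist[-1])
--         return fileList
--     return fileList
-- ===== SOURCE B (Python) =====
-- def createFileList(argslist):
--     if '-f' not in argslist:
--         return [argslist[-1]]
--     idx = argslist.index('-f')
--     return [x for x in argslist[idx + 1:] if x != '-f']
-- ===== Notes on version B (the rewrite author's own statement) =====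
-- stated objective: simpler
-- what changed: Replaces A's single-pass flag-threading loop (start flag plus accumulator) by locating the first '-f' with index(), slicing the suffix after it, and filtering out any later '-f'; the no-flag case returns the last element directly.
import Mathlib
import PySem

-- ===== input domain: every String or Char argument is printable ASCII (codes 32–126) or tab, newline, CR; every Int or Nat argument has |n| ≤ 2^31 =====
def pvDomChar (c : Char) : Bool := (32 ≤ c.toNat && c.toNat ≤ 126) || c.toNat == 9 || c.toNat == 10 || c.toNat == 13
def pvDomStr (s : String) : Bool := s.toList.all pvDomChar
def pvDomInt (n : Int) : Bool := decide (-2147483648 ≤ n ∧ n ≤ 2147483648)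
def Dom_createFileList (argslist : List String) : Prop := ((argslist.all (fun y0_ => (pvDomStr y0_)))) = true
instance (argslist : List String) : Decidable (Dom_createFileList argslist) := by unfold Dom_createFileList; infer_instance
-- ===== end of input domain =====

-- B replaces A's flag-threading single scan by index()+slice+filter; objective: simpler.
-- Equivalence is about the RETURN value (neither version mutates its argument).

-- ===== PORT A =====
-- loop body of A: state = (start, fileList)
def pvStepA (s : Nat × List String) (i : String) : Nat × List String :=
  if i = "-f" then (1, s.2)
  else if s.1 = 1 then (s.1, s.2 ++ [i])
  else s

def createFileList (argslist : List String) : List String :=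
  let st := argslist.foldl pvStepA (0, [])
  if st.1 = 0 then
    -- argslist[-1]: PySem.List.pyGet? is none exactly where Python raises IndexError (excluded by Pre_)
    st.2 ++ (PySem.List.pyGet? argslist (-1)).toList
  else st.2

-- ===== PORT B =====
def createFileList_alt (argslist : List String) : List String :=
  if argslist.contains "-f" = false then
    -- [argslist[-1]]; none = IndexError, excluded by Pre_
    (PySem.List.pyGet? argslist (-1)).toList
  else
    match PySem.List.index? argslist "-f" with
    | some idx => (PySem.List.slice argslist (some ((idx : Int) + 1)) none).filter (fun x => x != "-f")
    | none => []  -- unreachable: '-f' is contained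

-- ===== PRECONDITION & SPEC =====
-- Pre_ excludes only the empty list, on which A (and B) raise IndexError at argslist[-1].
def Pre_createFileList (argslist : List String) : Prop := argslist ≠ []
instance (argslist : List String) : Decidable (Pre_createFileList argslist) := by unfold Pre_createFileList; infer_instance
def pvWitness_createFileList : List String := ["-f", "a.txt"]

def Spec_createFileList (argslist : List String) (out : List String) : Prop := out = createFileList_alt argslist
instance (argslist : List String) (out : List String) : Decidable (Spec_createFileList argslist out) := by unfold Spec_createFileList; infer_instance

-- ===== CLAIM (what is proved, stated in full; the proofs are below) =====
def Claim_equal_createFileList : Prop := ∀ (argslist : List String), Dom_createFileList argslist → Pre_createFileList argslist → Spec_createFileList argslist (createFileList argslist)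

-- ===== LEMMAS AND PROOFS =====

-- once the flag is set, A appends exactly the non-'-f' elements of the rest
theorem pv_fold1 (l : List String) (acc : List String) :
    l.foldl pvStepA (1, acc) = (1, acc ++ l.filter (fun x => x != "-f")) := by
  induction l generalizing acc with
  | nil => simp
  | cons h t ih =>
    by_cases hh : h = "-f" <;> simp [pvStepA, hh, ih]

-- while the flag is unset and no '-f' has been seen, A's state stays (0, [])
theorem pv_fold0 (l : List String) (h : "-f" ∉ l) :
    l.foldl pvStepA (0, []) = (0, []) := by
  induction l with
  | nil => rfl
  | cons a t ih =>
    simp only [List.mem_cons, not_or] at h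
    simp [pvStepA, Ne.symm h.1, ih h.2]

-- B's value, characterised: with first index k of '-f', B returns the filtered tail after position k
theorem pv_alt_char (l : List String) (k : Nat) (hk : List.idxOf? "-f" l = some k) :
    createFileList_alt l = (l.drop (k + 1)).filter (fun x => x != "-f") := by
  have hmem : "-f" ∈ l := by
    by_contra hm
    simp [List.idxOf?_eq_none_iff.mpr hm] at hk
  have hcont : (l.contains "-f" = false) = False := by simp [hmem]
  have hs : PySem.List.slice l (some ((k : Int) + 1)) none = l.drop (k + 1) := by
    rw [PySem.List.slice_from (xs := l) (a := (k : Int) + 1) (by omega)]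
    norm_num
  simp only [createFileList_alt, PySem.List.index?, hk, hcont, if_false, hs]

-- A's fold, characterised the same way
theorem pv_fold_mem (l : List String) (k : Nat) (hk : List.idxOf? "-f" l = some k) :
    l.foldl pvStepA (0, []) = (1, (l.drop (k + 1)).filter (fun x => x != "-f")) := by
  induction l generalizing k with
  | nil => simp at hk
  | cons a t ih =>
    by_cases ha : a = "-f"
    · subst ha
      have : k = 0 := by simp [List.idxOf?_cons] at hk; omega
      subst this
      simp [pvStepA, pv_fold1]
    · have hb : (a == "-f") = false := by simp [ha]
      rw [List.idxOf?_cons, hb] at hk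
      simp only [Bool.false_eq_true, if_false] at hk
      cases hk' : List.idxOf? "-f" t with
      | none => rw [hk'] at hk; simp at hk
      | some k' =>
        rw [hk'] at hk
        simp only [Option.map_some, Option.some.injEq] at hk
        obtain rfl : k = k' + 1 := hk.symm
        simp [pvStepA, ha, ih k' hk']

-- ===== VERDICT (by name: the statement is the Claim_ definition above) =====
theorem createFileList_spec : Claim_equal_createFileList := by
  intro argslist _ hpre
  unfold Spec_createFileList createFileList
  by_cases hmem : "-f" ∈ argslist
  · cases hk : List.idxOf? "-f" argslist with
    | none => exact absurd (List.idxOf?_eq_none_iff.mp hk) (by simpa using hmem)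
    | some k => simp [pv_fold_mem argslist k hk, pv_alt_char argslist k hk]
  · have hcontains : argslist.contains "-f" = false := by simpa using hmem
    simp only [pv_fold0 argslist hmem, createFileList_alt, hcontains]
    simp
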